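-- pv_equiv track=rewrite | github.com/NoahDavison001/Noughts-and-crosses | updated_training.py | inverse_transform
-- ===== SOURCE A (Python) =====
-- def inverse_transform(move, transform):
--     x, y = move % 3, move // 3
--     rot, flip = transform
--     # inverse flip first
--     if flip == "lr":
--         x = 2 - x
--     elif flip == "ud":
--         y = 2 - y
--     # inverse rotation
--     for _ in range(rot):
--         x, y = 2 - y, x
--     return (y * 3) + x
-- ===== SOURCE B (Python) =====
-- def inverse_transform(move, transform):
--     rot, flip = transform
--     x = 2 - move % 3 if flip == "lr" else move % 3
--     y = 2 - move // 3 if flip == "ud" else move // 3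
--     # closed-form inverse rotation: pick the orbit element for the effective quarter-turns
--     q = rot % 4 if rot > 0 else 0
--     x, y = ((x, y), (2 - y, x), (2 - x, 2 - y), (y, 2 - x))[q]
--     return y * 3 + x
-- ===== Notes on version B (the rewrite author's own statement) =====
-- stated objective: faster
-- what changed: Replaced the rot-iteration rotation loop by a closed-form selection of the rotated coordinates from rot % 4 (identity when rot <= 0), using that the quarter-turn map has order 4.
import Mathlib
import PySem

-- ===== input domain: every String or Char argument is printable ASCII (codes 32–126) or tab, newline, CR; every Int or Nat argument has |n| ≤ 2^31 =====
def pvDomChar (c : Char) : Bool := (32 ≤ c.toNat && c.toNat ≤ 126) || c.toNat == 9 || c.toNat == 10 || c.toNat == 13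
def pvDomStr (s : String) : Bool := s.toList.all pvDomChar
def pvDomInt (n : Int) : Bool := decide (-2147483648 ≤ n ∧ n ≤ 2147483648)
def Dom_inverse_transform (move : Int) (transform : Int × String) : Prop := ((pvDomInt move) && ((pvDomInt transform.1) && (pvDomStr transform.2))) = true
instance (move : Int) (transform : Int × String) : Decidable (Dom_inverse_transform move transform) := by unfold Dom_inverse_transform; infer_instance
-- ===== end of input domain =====

-- B replaces A's rot-iteration rotation loop with a closed-form tuple selection keyed by rot % 4 (faster: O(1) vs O(rot)).

-- ===== PORT A =====
def inverse_transform (move : Int) (transform : Int × String) : Int :=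
  let x := PySem.Int.mod move 3
  let y := PySem.Int.floordiv move 3
  let rot := transform.1
  let flip := transform.2
  -- inverse flip first
  let xy : Int × Int :=
    if flip = "lr" then (2 - x, y)
    else if flip = "ud" then (x, 2 - y)
    else (x, y)
  -- inverse rotation: for _ in range(rot): x, y = 2 - y, x
  let xy := (PySem.List.pyRange 0 rot 1).foldl (fun (p : Int × Int) _ => (2 - p.2, p.1)) xy
  (xy.2 * 3) + xy.1

-- ===== PORT B =====
def inverse_transform_alt (move : Int) (transform : Int × String) : Int :=
  let rot := transform.1
  let flip := transform.2
  let x : Int := if flip = "lr" then 2 - PySem.Int.mod move 3 else PySem.Int.mod move 3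
  let y : Int := if flip = "ud" then 2 - PySem.Int.floordiv move 3 else PySem.Int.floordiv move 3
  -- closed-form inverse rotation: tuple indexing; q is always in [0,4), so pyGet? is some
  -- (the .getD default is never used; it only totalises the Lean lookup)
  let q : Int := if rot > 0 then PySem.Int.mod rot 4 else 0
  let xy : Int × Int :=
    (PySem.List.pyGet? [(x, y), (2 - y, x), (2 - x, 2 - y), (y, 2 - x)] q).getD (x, y)
  xy.2 * 3 + xy.1

-- ===== PRECONDITION & SPEC =====
def Spec_inverse_transform (move : Int) (transform : Int × String) (out : Int) : Prop := out = inverse_transform_alt move transform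
instance (move : Int) (transform : Int × String) (out : Int) : Decidable (Spec_inverse_transform move transform out) := by unfold Spec_inverse_transform; infer_instance

-- ===== CLAIM (what is proved, stated in full; the proofs are below) =====
def Claim_equal_inverse_transform : Prop := ∀ (move : Int) (transform : Int × String), Dom_inverse_transform move transform → Spec_inverse_transform move transform (inverse_transform move transform)

-- ===== LEMMAS AND PROOFS =====

-- the quarter-turn step of A's loop
def pvStep (p : Int × Int) : Int × Int := (2 - p.2, p.1)

theorem pvStep_four (p : Int × Int) : pvStep^[4] p = p := by
  cases p with
  | mk x y => simp [pvStep, Function.iterate_succ_apply']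

theorem pvStep_iterate_mod (n : Nat) (p : Int × Int) :
    pvStep^[n] p = pvStep^[n % 4] p := by
  have h4 : pvStep^[4] = id := funext pvStep_four
  conv_lhs => rw [← Nat.mod_add_div n 4]
  rw [Function.iterate_add_apply, Function.iterate_mul, h4,
    Function.iterate_id, id]

theorem pvFoldl_range (n : Nat) (p : Int × Int) :
    (List.range n).foldl (fun (q : Int × Int) (_ : Nat) => (2 - q.2, q.1)) p = pvStep^[n] p := by
  induction n with
  | zero => simp
  | succ k ih =>
      rw [List.range_succ, List.foldl_append, ih, Function.iterate_succ_apply']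
      rfl

-- A's rotation loop equals B's tuple selection, for every rot and start pair
theorem pvLoop_closed (rot : Int) (p : Int × Int) :
    (PySem.List.pyRange 0 rot 1).foldl (fun (q : Int × Int) _ => (2 - q.2, q.1)) p
      = (PySem.List.pyGet?
          [p, (2 - p.2, p.1), (2 - p.1, 2 - p.2), (p.2, 2 - p.1)]
          (if rot > 0 then PySem.Int.mod rot 4 else 0)).getD p := by
  rw [PySem.List.pyRange_one]
  rw [List.foldl_map]
  rw [pvFoldl_range ((rot - 0).toNat) p, pvStep_iterate_mod]
  by_cases hrot : 0 < rot
  · have hm : PySem.Int.mod rot 4 = rot % 4 := PySem.Int.mod_eq_emod_of_pos (by omega)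
    have hk : rot % 4 = ((rot.toNat % 4 : Nat) : Int) := by omega
    simp only [hrot, if_pos, hm]
    have h : rot.toNat % 4 = 0 ∨ rot.toNat % 4 = 1 ∨
        rot.toNat % 4 = 2 ∨ rot.toNat % 4 = 3 := by omega
    rcases h with h | h | h | h <;>
      simp [h, hk, pvStep, Function.iterate_succ_apply', PySem.List.pyGet?, PySem.List.pyIdx?]
  · have hz : rot.toNat = 0 := by omega
    simp [hz, hrot, PySem.List.pyGet?, PySem.List.pyIdx?]

-- A's flip pair equals B's two conditional coordinates ("lr" and "ud" are distinct)
theorem pvFlip_eq (flip : String) (x y : Int) :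
    (if flip = "lr" then (2 - x, y)
     else if flip = "ud" then (x, 2 - y)
     else (x, y))
      = ((if flip = "lr" then 2 - x else x, if flip = "ud" then 2 - y else y) : Int × Int) := by
  split_ifs with h1 h2 <;> simp_all

-- ===== VERDICT (by name: the statement is the Claim_ definition above) =====
theorem inverse_transform_spec : Claim_equal_inverse_transform := by
  intro move transform _
  unfold Spec_inverse_transform inverse_transform inverse_transform_alt
  simp only [pvFlip_eq, pvLoop_closed]
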